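-- pv_equiv track=rewrite | github.com/to-ha/ticketneedle | bench/scorer.py | _strip_leading_number
-- ===== SOURCE A (Python) =====
-- def _strip_leading_number(s: str) -> str:
--     # Match "1. ", "12) ", "1: " etc.
--     i = 0
--     while i < len(s) and s[i].isdigit():
--         i += 1
--     if i > 0 and i < len(s) and s[i] in (".", ")", ":"):
--         rest = s[i + 1:].lstrip()
--         return rest
--     return s
-- ===== SOURCE B (Python) =====
-- def _strip_leading_number(s: str) -> str:
--     for delim in (".", ")", ":"):
--         head, sep, tail = s.partition(delim)
--         if sep and head.isdigit():
--             return tail.lstrip()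
--     return s
-- ===== Notes on version B (the rewrite author's own statement) =====
-- stated objective: idiomatic
-- what changed: Replaces the manual index walk over digits with a loop over the three delimiters using str.partition: the string is split at the first occurrence of each delimiter and the all-digit test is done on the head via str.isdigit, instead of advancing an index char by char and then testing s[i].
import Mathlib
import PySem

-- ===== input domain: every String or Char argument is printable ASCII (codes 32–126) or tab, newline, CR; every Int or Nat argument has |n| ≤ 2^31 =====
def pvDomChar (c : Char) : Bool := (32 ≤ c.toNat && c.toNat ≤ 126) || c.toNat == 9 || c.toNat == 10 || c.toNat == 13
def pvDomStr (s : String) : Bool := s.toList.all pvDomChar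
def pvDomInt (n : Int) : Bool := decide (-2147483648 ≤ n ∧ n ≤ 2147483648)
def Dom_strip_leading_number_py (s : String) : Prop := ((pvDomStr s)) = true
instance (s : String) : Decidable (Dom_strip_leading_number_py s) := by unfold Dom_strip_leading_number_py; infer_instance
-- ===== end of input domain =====

-- B rewrites A's char-by-char digit scan as an idiomatic loop over the three delimiters
-- using str.partition and head.isdigit(); same cost, different decomposition.

-- ===== PORT A =====
-- the `while i < len(s) and s[i].isdigit(): i += 1` loop, counting leading digits
def pvScanDigits : List Char → Nat
  | [] => 0
  | c :: cs => if PySem.Chars.isdigit c then pvScanDigits cs + 1 else 0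

def strip_leading_number_py (s : String) : String :=
  let cs := s.toList
  let i := pvScanDigits cs
  if 0 < i ∧ i < cs.length ∧
      (PySem.List.pyGet? cs (i : Int) = some '.' ∨ PySem.List.pyGet? cs (i : Int) = some ')' ∨
        PySem.List.pyGet? cs (i : Int) = some ':') then
    String.ofList (PySem.Chars.lstrip (PySem.List.slice cs (some ((i : Int) + 1)) none))
  else s

-- ===== PORT B =====
-- str.partition(d): split at the FIRST occurrence of d (hand port; exact: uses Chars.find)
def pvPartition (cs : List Char) (d : Char) : List Char × List Char × List Char :=
  let j := PySem.Chars.find cs [d]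
  if j = -1 then (cs, [], []) else (cs.take j.toNat, [d], cs.drop (j.toNat + 1))

-- the `for delim in (".", ")", ":")` loop of B
def pvDelimLoop (cs : List Char) : List Char → List Char
  | [] => cs
  | d :: ds =>
    let p := pvPartition cs d
    if p.2.1 ≠ [] ∧ PySem.Chars.strIsdigit p.1 = true then PySem.Chars.lstrip p.2.2
    else pvDelimLoop cs ds

def strip_leading_number_py_alt (s : String) : String :=
  String.ofList (pvDelimLoop s.toList ['.', ')', ':'])

-- ===== PRECONDITION & SPEC =====
def Spec_strip_leading_number_py (s : String) (out : String) : Prop := out = strip_leading_number_py_alt s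
instance (s : String) (out : String) : Decidable (Spec_strip_leading_number_py s out) := by unfold Spec_strip_leading_number_py; infer_instance

-- ===== CLAIM (what is proved, stated in full; the proofs are below) =====
def Claim_equal_strip_leading_number_py : Prop := ∀ (s : String), Dom_strip_leading_number_py s → Spec_strip_leading_number_py s (strip_leading_number_py s)

-- ===== LEMMAS AND PROOFS =====

theorem pvScanDigits_lt_digit (cs : List Char) :
    ∀ i < pvScanDigits cs, ∃ c, cs[i]? = some c ∧ PySem.Chars.isdigit c = true := by
  induction cs with
  | nil => simp [pvScanDigits]
  | cons c cs ih =>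
    intro i hi
    simp only [pvScanDigits] at hi
    split at hi
    · cases i with
      | zero => exact ⟨c, by simpa using ‹PySem.Chars.isdigit c = true›⟩
      | succ i =>
        obtain ⟨c', hc'⟩ := ih i (by omega)
        exact ⟨c', by simpa using hc'⟩
    · omega

theorem pvScanDigits_eq_of (cs : List Char) (j : Nat) (d : Char)
    (hall : ∀ i < j, ∃ c, cs[i]? = some c ∧ PySem.Chars.isdigit c = true)
    (hj : cs[j]? = some d) (hd : PySem.Chars.isdigit d = false) :
    pvScanDigits cs = j := by
  induction cs generalizing j with
  | nil => simp at hj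
  | cons c cs ih =>
    cases j with
    | zero =>
      simp only [List.getElem?_cons_zero, Option.some.injEq] at hj
      subst hj
      simp [pvScanDigits, hd]
    | succ j =>
      obtain ⟨c0, hc0, hdig⟩ := hall 0 (by omega)
      simp only [List.getElem?_cons_zero, Option.some.injEq] at hc0
      subst hc0
      simp only [pvScanDigits, hdig, if_true]
      have := ih j (fun i hi => by
        obtain ⟨c', hc'⟩ := hall (i + 1) (by omega)
        exact ⟨c', by simpa using hc'⟩) (by simpa using hj)
      omega

-- for a non-digit char at position j: the head of partition is all-digit iff j is exactly
-- the (positive) digit-prefix length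
theorem strIsdigit_take_iff (cs : List Char) (j : Nat) (d : Char)
    (hj : cs[j]? = some d) (hd : PySem.Chars.isdigit d = false) :
    PySem.Chars.strIsdigit (cs.take j) = true ↔ (0 < j ∧ pvScanDigits cs = j) := by
  have hjlen : j < cs.length := List.getElem?_eq_some_iff.mp hj |>.1
  constructor
  · intro h
    simp only [PySem.Chars.strIsdigit, Bool.and_eq_true, List.all_eq_true] at h
    obtain ⟨hne, hall⟩ := h
    have hj0 : 0 < j := by
      by_contra h0
      have : j = 0 := by omega
      subst this
      simp at hne
    refine ⟨hj0, pvScanDigits_eq_of cs j d ?_ hj hd⟩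
    intro i hi
    have hmem : cs[i]'(by omega) ∈ cs.take j := by
      rw [List.mem_take_iff_getElem]
      exact ⟨i, by omega, by simp⟩
    exact ⟨cs[i]'(by omega), by simp, hall _ hmem⟩
  · rintro ⟨hj0, hscan⟩
    simp only [PySem.Chars.strIsdigit, Bool.and_eq_true, List.all_eq_true]
    constructor
    · have hcs0 : cs ≠ [] := by
        intro h
        subst h
        simp at hjlen
      simp [List.take_eq_nil_iff, hcs0]
      omega
    · intro x hx
      rw [List.mem_take_iff_getElem] at hx
      obtain ⟨i, hi, hxe⟩ := hx
      obtain ⟨c', hc', hdig⟩ := pvScanDigits_lt_digit cs i (by omega)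
      have : cs[i]'(by omega) = c' := by
        have hg : cs[i]? = some (cs[i]'(by omega)) := List.getElem?_eq_getElem (by omega)
        rw [hg] at hc'
        exact Option.some.inj hc'
      rw [← hxe, this]
      exact hdig

theorem singleton_prefix_drop (cs : List Char) (i : Nat) (d : Char) :
    [d] <+: cs.drop i ↔ cs[i]? = some d := by
  rw [← List.head?_drop]
  cases h : cs.drop i with
  | nil => simp
  | cons a t =>
    simp only [List.head?_cons]
    constructor
    · rintro ⟨r, hr⟩
      simp only [List.singleton_append] at hr
      cases hr
      rfl
    · intro h2
      cases h2
      exact ⟨t, rfl⟩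

-- when the first non-digit position k holds the delimiter e, partition splits exactly there
theorem pvPartition_pass (cs : List Char) (e : Char)
    (he : PySem.Chars.isdigit e = false)
    (h : cs[pvScanDigits cs]? = some e) :
    pvPartition cs e = (cs.take (pvScanDigits cs), [e], cs.drop (pvScanDigits cs + 1)) := by
  set k := pvScanDigits cs with hk
  have hocc : [e] <+: cs.drop k := (singleton_prefix_drop cs k e).mpr h
  have hnonneg : 0 ≤ PySem.Chars.find cs [e] := by
    rw [PySem.Chars.find_nonneg_iff, ← PySem.Chars.isIn_iff_infix,
      ← PySem.Chars.exists_prefix_drop_iff_isIn]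
    exact ⟨k, hocc⟩
  obtain ⟨hpre, hmin⟩ := PySem.Chars.find_spec hnonneg
  set j := (PySem.Chars.find cs [e]).toNat with hjdef
  have hje : cs[j]? = some e := (singleton_prefix_drop cs j e).mp hpre
  have hjk : j = k := by
    have hle : j ≤ k := by
      by_contra hgt
      exact hmin k (by omega) hocc
    by_contra hne
    obtain ⟨c', hc', hdig⟩ := pvScanDigits_lt_digit cs j (by omega)
    rw [hje] at hc'
    cases Option.some.inj hc'
    rw [hdig] at he
    exact absurd he (by simp)
  have hfind : PySem.Chars.find cs [e] = (k : Int) := by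
    omega
  simp only [pvPartition, hfind, Int.toNat_natCast]
  rw [if_neg (by omega)]

-- when the digit-prefix/delimiter condition fails for e, B's per-delimiter check fails
theorem pvPartition_fail (cs : List Char) (e : Char)
    (he : PySem.Chars.isdigit e = false)
    (h : ¬(0 < pvScanDigits cs ∧ cs[pvScanDigits cs]? = some e)) :
    (pvPartition cs e).2.1 = [] ∨ PySem.Chars.strIsdigit (pvPartition cs e).1 = false := by
  by_cases hneg : PySem.Chars.find cs [e] = -1
  · left
    simp [pvPartition, hneg]
  · right
    have hnonneg : 0 ≤ PySem.Chars.find cs [e] := by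
      have := PySem.Chars.neg_one_le_find (s := cs) (sub := [e])
      omega
    obtain ⟨hpre, _⟩ := PySem.Chars.find_spec hnonneg
    set j := (PySem.Chars.find cs [e]).toNat with hjdef
    have hje : cs[j]? = some e := (singleton_prefix_drop cs j e).mp hpre
    have hpart : (pvPartition cs e).1 = cs.take j := by
      simp [pvPartition, hneg]
      omega
    rw [hpart]
    by_contra hb
    have htrue : PySem.Chars.strIsdigit (cs.take j) = true := by
      cases hv : PySem.Chars.strIsdigit (cs.take j) with
      | false => exact absurd hv hb
      | true => rfl
    obtain ⟨hj0, hscan⟩ := (strIsdigit_take_iff cs j e hje he).mp htrue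
    exact h ⟨by omega, by rw [hscan]; exact hje⟩

theorem delim_not_digit : PySem.Chars.isdigit '.' = false ∧ PySem.Chars.isdigit ')' = false ∧
    PySem.Chars.isdigit ':' = false := by decide

theorem main_equiv (s : String) : strip_leading_number_py s = strip_leading_number_py_alt s := by
  unfold strip_leading_number_py strip_leading_number_py_alt
  set cs := s.toList with hcs
  set k := pvScanDigits cs with hk
  simp only [PySem.List.pyGet?_natCast]
  by_cases hC : 0 < k ∧ k < cs.length ∧ (cs[k]? = some '.' ∨ cs[k]? = some ')' ∨ cs[k]? = some ':')
  · rw [if_pos hC]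
    obtain ⟨hk0, hklen, hdel⟩ := hC
    have hslice : PySem.List.slice cs (some ((k : Int) + 1)) none = cs.drop (k + 1) := by
      have h1 : ((k : Int) + 1).toNat = k + 1 := by omega
      rw [PySem.List.slice_from (xs := cs) (a := (k : Int) + 1) (by omega), h1]
    rw [hslice]
    rcases hdel with hd | hd | hd
    · -- delimiter '.'
      have hp := pvPartition_pass cs '.' delim_not_digit.1 (hk ▸ hd)
      rw [← hk] at hp
      have hcheck := (strIsdigit_take_iff cs k '.' hd delim_not_digit.1).mpr ⟨hk0, rfl⟩
      simp only [pvDelimLoop, hp, hcheck]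
      rw [if_pos (by simp)]
    · -- delimiter ')': the '.' check must fail first
      have hfail : ¬(0 < k ∧ cs[k]? = some '.') := by
        rintro ⟨_, h2⟩; rw [hd] at h2; exact absurd (Option.some.inj h2) (by decide)
      have hp := pvPartition_pass cs ')' delim_not_digit.2.1 (hk ▸ hd)
      rw [← hk] at hp
      have hcheck := (strIsdigit_take_iff cs k ')' hd delim_not_digit.2.1).mpr ⟨hk0, rfl⟩
      rcases pvPartition_fail cs '.' delim_not_digit.1 hfail with hf | hf <;>
        simp only [pvDelimLoop, hf, hp, hcheck] <;> simp
    · -- delimiter ':': the '.' and ')' checks must fail first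
      have hfail1 : ¬(0 < k ∧ cs[k]? = some '.') := by
        rintro ⟨_, h2⟩; rw [hd] at h2; exact absurd (Option.some.inj h2) (by decide)
      have hfail2 : ¬(0 < k ∧ cs[k]? = some ')') := by
        rintro ⟨_, h2⟩; rw [hd] at h2; exact absurd (Option.some.inj h2) (by decide)
      have hp := pvPartition_pass cs ':' delim_not_digit.2.2 (hk ▸ hd)
      rw [← hk] at hp
      have hcheck := (strIsdigit_take_iff cs k ':' hd delim_not_digit.2.2).mpr ⟨hk0, rfl⟩
      rcases pvPartition_fail cs '.' delim_not_digit.1 hfail1 with hf1 | hf1 <;>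
        rcases pvPartition_fail cs ')' delim_not_digit.2.1 hfail2 with hf2 | hf2 <;>
          simp only [pvDelimLoop, hf1, hf2, hp, hcheck] <;> simp
  · rw [if_neg hC]
    -- A's condition fails: every per-delimiter check of B fails too
    have hgen : ∀ e, PySem.Chars.isdigit e = false →
        (e = '.' ∨ e = ')' ∨ e = ':') → ¬(0 < k ∧ cs[k]? = some e) := by
      rintro e he hmem ⟨h0, hsome⟩
      have hlen : k < cs.length := List.getElem?_eq_some_iff.mp hsome |>.1
      refine hC ⟨h0, hlen, ?_⟩
      rcases hmem with rfl | rfl | rfl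
      · exact Or.inl hsome
      · exact Or.inr (Or.inl hsome)
      · exact Or.inr (Or.inr hsome)
    rcases pvPartition_fail cs '.' delim_not_digit.1
        (hgen '.' delim_not_digit.1 (Or.inl rfl)) with hf1 | hf1 <;>
      rcases pvPartition_fail cs ')' delim_not_digit.2.1
          (hgen ')' delim_not_digit.2.1 (Or.inr (Or.inl rfl))) with hf2 | hf2 <;>
        rcases pvPartition_fail cs ':' delim_not_digit.2.2
            (hgen ':' delim_not_digit.2.2 (Or.inr (Or.inr rfl))) with hf3 | hf3 <;>
          simp only [pvDelimLoop, hf1, hf2, hf3] <;> simp [hcs]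

-- ===== VERDICT (by name: the statement is the Claim_ definition above) =====
theorem strip_leading_number_py_spec : Claim_equal_strip_leading_number_py := by
  intro s _
  unfold Spec_strip_leading_number_py
  exact main_equiv s
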